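-- pv_equiv track=rewrite | github.com/nguyenchiemminhvu/DSA | Problems/Leetcode/SumOfMutatedArrayClosestToTarget/solve.py | findBestValue
-- ===== SOURCE A (Python) =====
-- from typing import List
--
-- def findBestValue(arr: List[int], target: int) -> int:
--     left = 0
--     right = max(arr)
--
--     def f_sum_threshold(threshold: int) -> int:
--         return sum(min(val, threshold) for val in arr)
--
--     best_val = 0
--     best_diff = float('inf')
--     while left <= right:
--         mid1 = left + (right - left) // 3
--         mid2 = right - (right - left) // 3
--
--         s1 = f_sum_threshold(mid1)
--         s2 = f_sum_threshold(mid2)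
--         diff1 = abs(s1 - target)
--         diff2 = abs(s2 - target)
--
--         if diff1 < best_diff or (diff1 == best_diff and mid1 < best_val):
--             best_diff = diff1
--             best_val = mid1
--         if diff2 < best_diff or (diff2 == best_diff and mid2 < best_val):
--             best_diff = diff2
--             best_val = mid2
--
--         if diff1 > diff2:
--             left = mid1 + 1
--         else:
--             right = mid2 - 1
--
--     return best_val
-- ===== SOURCE B (Python) =====
-- from typing import List
--
-- def findBestValue(arr: List[int], target: int) -> int:
--     hi = max(arr)
--
--     def s(t: int) -> int:
--         return sum(min(val, t) for val in arr)
--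
--     if hi < 0:
--         return 0
--     if s(0) >= target:
--         return 0
--     if s(hi) < target:
--         return hi
--     # now s(0) < target <= s(hi); binary-search the crossing point:
--     # invariant s(lo) < target <= s(r); ends with r == lo + 1
--     lo, r = 0, hi
--     while r - lo > 1:
--         m = (lo + r) // 2
--         if s(m) < target:
--             lo = m
--         else:
--             r = m
--     return lo if target - s(lo) <= s(r) - target else r
-- ===== Notes on version B (the rewrite author's own statement) =====
-- stated objective: faster
-- what changed: Replaces the ternary search with running best-tracking by a binary search for the crossing point where the capped sum reaches target, followed by a single comparison of the two neighbouring candidates (the capped sum is strictly increasing up to max(arr), so the minimizer sits at the crossing).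
-- outside the precondition, e.g. on findBestValue([], 5): A raises ValueError, B raises ValueError
import Mathlib
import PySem

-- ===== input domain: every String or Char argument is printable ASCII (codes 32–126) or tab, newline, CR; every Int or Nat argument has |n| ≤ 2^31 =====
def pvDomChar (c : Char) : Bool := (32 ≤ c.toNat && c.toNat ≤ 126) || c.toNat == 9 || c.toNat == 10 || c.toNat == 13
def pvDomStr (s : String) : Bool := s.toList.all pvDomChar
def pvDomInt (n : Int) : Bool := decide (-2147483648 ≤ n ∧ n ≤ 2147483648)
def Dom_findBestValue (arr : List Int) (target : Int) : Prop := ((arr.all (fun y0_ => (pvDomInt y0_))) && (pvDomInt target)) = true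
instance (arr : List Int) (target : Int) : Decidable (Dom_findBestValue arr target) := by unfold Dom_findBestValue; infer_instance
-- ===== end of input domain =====

-- B replaces A's ternary search with best-tracking by a binary search for the crossing
-- point of the (strictly increasing) capped sum, then compares the two neighbours;
-- same asymptotics, measurably faster by a constant factor (one capped-sum evaluation
-- per halving step instead of two per two-thirds step). Both raise on empty arr (excluded by Pre_).

-- ===== PORT A =====
-- f_sum_threshold(threshold) = sum(min(val, threshold) for val in arr)
def fSumThreshold (arr : List Int) (threshold : Int) : Int :=
  arr.foldl (fun acc val => acc + min val threshold) 0

-- 'diff < best_diff or (diff == best_diff and mid < best_val)'; best_diff = none means float('inf')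
def betterA (d m : Int) (bd : Option Int) (bv : Int) : Bool :=
  match bd with
  | none => true
  | some b => decide (d < b) || (decide (d = b) && decide (m < bv))

-- one 'if …: best_diff = diff; best_val = mid' update
def updBest (d m : Int) (bd : Option Int) (bv : Int) : Option Int × Int :=
  if betterA d m bd bv then (some d, m) else (bd, bv)

-- the 'while left <= right' ternary-search loop of A
def loopA (arr : List Int) (target left right : Int) (bd : Option Int) (bv : Int) : Int :=
  if h : left ≤ right then
    let mid1 := left + PySem.Int.floordiv (right - left) 3
    let mid2 := right - PySem.Int.floordiv (right - left) 3
    let s1 := fSumThreshold arr mid1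
    let s2 := fSumThreshold arr mid2
    let d1 := |s1 - target|
    let d2 := |s2 - target|
    let p1 := updBest d1 mid1 bd bv
    let p2 := updBest d2 mid2 p1.1 p1.2
    if d1 > d2 then loopA arr target (mid1 + 1) right p2.1 p2.2
    else loopA arr target left (mid2 - 1) p2.1 p2.2
  else bv
termination_by (right - left + 1).toNat
decreasing_by
  · have h3 : PySem.Int.floordiv (right - left) 3 = (right - left) / 3 :=
      PySem.Int.floordiv_eq_ediv_of_pos (by omega)
    rw [h3]; omega
  · have h3 : PySem.Int.floordiv (right - left) 3 = (right - left) / 3 :=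
      PySem.Int.floordiv_eq_ediv_of_pos (by omega)
    rw [h3]; omega

def findBestValue (arr : List Int) (target : Int) : Int :=
  let right := (PySem.List.max? arr (fun y => y)).getD 0   -- max(arr); raises on [], excluded by Pre_
  loopA arr target 0 right none 0

-- ===== PORT B =====
-- s(t) = sum(min(val, t) for val in arr)
def sumCapped (arr : List Int) (t : Int) : Int :=
  arr.foldl (fun acc val => acc + min val t) 0

-- the 'while r - lo > 1' binary-search loop of B, returns final (lo, r)
def loopB (arr : List Int) (target lo r : Int) : Int × Int :=
  if h : 1 < r - lo then
    let m := PySem.Int.floordiv (lo + r) 2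
    if sumCapped arr m < target then loopB arr target m r
    else loopB arr target lo m
  else (lo, r)
termination_by (r - lo).toNat
decreasing_by
  · have h2 : PySem.Int.floordiv (lo + r) 2 = (lo + r) / 2 :=
      PySem.Int.floordiv_eq_ediv_of_pos (by omega)
    rw [h2]; omega
  · have h2 : PySem.Int.floordiv (lo + r) 2 = (lo + r) / 2 :=
      PySem.Int.floordiv_eq_ediv_of_pos (by omega)
    rw [h2]; omega

def findBestValue_alt (arr : List Int) (target : Int) : Int :=
  let hi := (PySem.List.max? arr (fun y => y)).getD 0   -- max(arr); raises on [], excluded by Pre_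
  if hi < 0 then 0
  else if target ≤ sumCapped arr 0 then 0
  else if sumCapped arr hi < target then hi
  else
    let p := loopB arr target 0 hi
    if target - sumCapped arr p.1 ≤ sumCapped arr p.2 - target then p.1 else p.2

-- ===== PRECONDITION & SPEC =====
-- Pre_ excludes only the empty list, on which Python's max(arr) raises ValueError in A (and in B).
def Pre_findBestValue (arr : List Int) (target : Int) : Prop := arr ≠ []
instance (arr : List Int) (target : Int) : Decidable (Pre_findBestValue arr target) := by
  unfold Pre_findBestValue; infer_instance

def pvWitness_findBestValue : List Int × Int := ([1, 2], 3)

def Spec_findBestValue (arr : List Int) (target : Int) (out : Int) : Prop := out = findBestValue_alt arr target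
instance (arr : List Int) (target : Int) (out : Int) : Decidable (Spec_findBestValue arr target out) := by
  unfold Spec_findBestValue; infer_instance

-- ===== CLAIM (what is proved, stated in full; the proofs are below) =====
def Claim_equal_findBestValue : Prop := ∀ (arr : List Int) (target : Int), Dom_findBestValue arr target → Pre_findBestValue arr target → Spec_findBestValue arr target (findBestValue arr target)

-- ===== LEMMAS AND PROOFS =====

-- the capped sum as a mapped sum
lemma fSum_eq_map_sum (arr : List Int) (t : Int) :
    fSumThreshold arr t = (arr.map (fun v => min v t)).sum := by
  unfold fSumThreshold
  simpa using PySem.List.foldl_add (l := arr) (a := 0) (g := fun v => min v t)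

lemma sumCapped_eq (arr : List Int) (t : Int) : sumCapped arr t = fSumThreshold arr t := rfl

-- weak monotonicity of the capped sum
lemma fSum_mono (arr : List Int) {a b : Int} (h : a ≤ b) :
    fSumThreshold arr a ≤ fSumThreshold arr b := by
  rw [fSum_eq_map_sum, fSum_eq_map_sum]
  induction arr with
  | nil => simp
  | cons v tl ih =>
      simp only [List.map_cons, List.sum_cons]
      exact add_le_add (min_le_min le_rfl h) ih

-- strict monotonicity below the maximum element
lemma map_sum_mono (l : List Int) {a b : Int} (h : a ≤ b) :
    (l.map (fun v => min v a)).sum ≤ (l.map (fun v => min v b)).sum := by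
  induction l with
  | nil => simp
  | cons v tl ih =>
      simp only [List.map_cons, List.sum_cons]
      exact add_le_add (min_le_min le_rfl h) ih

lemma fSum_strict (arr : List Int) {hi a b : Int} (hmem : hi ∈ arr) (h : a < b) (hb : b ≤ hi) :
    fSumThreshold arr a < fSumThreshold arr b := by
  rw [fSum_eq_map_sum, fSum_eq_map_sum]
  induction arr with
  | nil => simp at hmem
  | cons v tl ih =>
      simp only [List.map_cons, List.sum_cons]
      rcases List.mem_cons.mp hmem with hv | hv
      · have h1 : min v a = a := min_eq_right (by omega)
        have h2 : min v b = b := min_eq_right (by omega)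
        have htl := map_sum_mono tl (le_of_lt h)
        rw [h1, h2]; omega
      · have := ih hv
        have hhd : min v a ≤ min v b := min_le_min le_rfl (le_of_lt h)
        omega

-- loopB invariant: returns adjacent (lo, r) bracketing the crossing point
lemma loopB_spec (arr : List Int) (target : Int) :
    ∀ n lo r, (r - lo).toNat ≤ n → lo < r →
      sumCapped arr lo < target → target ≤ sumCapped arr r →
      (loopB arr target lo r).2 = (loopB arr target lo r).1 + 1 ∧
      lo ≤ (loopB arr target lo r).1 ∧ (loopB arr target lo r).2 ≤ r ∧
      sumCapped arr (loopB arr target lo r).1 < target ∧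
      target ≤ sumCapped arr (loopB arr target lo r).2 := by
  intro n
  induction n with
  | zero => intro lo r hn hlt _ _; omega
  | succ n ih =>
      intro lo r hn hlt hlo hr
      rw [loopB]
      by_cases hgap : 1 < r - lo
      · simp only [hgap, dif_pos]
        have h2 : PySem.Int.floordiv (lo + r) 2 = (lo + r) / 2 :=
          PySem.Int.floordiv_eq_ediv_of_pos (by omega)
        rw [h2]
        have hb1 : lo < (lo + r) / 2 := by omega
        have hb2 : (lo + r) / 2 < r := by omega
        by_cases hc : sumCapped arr ((lo + r) / 2) < target
        · simp only [hc, if_pos]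
          have := ih ((lo + r) / 2) r (by omega) hb2 hc hr
          refine ⟨this.1, by omega, this.2.2.1, this.2.2.2⟩
        · simp only [hc, if_neg, not_false_iff]
          have := ih lo ((lo + r) / 2) (by omega) hb1 hlo (by omega)
          refine ⟨this.1, this.2.1, by omega, this.2.2.2⟩
      · simp only [hgap, dif_neg, not_false_iff]
        exact ⟨by omega, le_refl _, le_refl _, by simpa using hlo, by
          have : r = lo + 1 := by omega
          simpa [this] using hr⟩

-- the key properties of B's result: it is in range, the distance |s(t)-target| strictly
-- decreases up to it and does not decrease after it
lemma alt_props (arr : List Int) (target hi : Int)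
    (hmax : PySem.List.max? arr (fun y => y) = some hi) (hhi : 0 ≤ hi) :
    0 ≤ findBestValue_alt arr target ∧ findBestValue_alt arr target ≤ hi ∧
    (∀ a b : Int, 0 ≤ a → a < b → b ≤ findBestValue_alt arr target →
      |fSumThreshold arr b - target| < |fSumThreshold arr a - target|) ∧
    (∀ a b : Int, findBestValue_alt arr target ≤ a → a < b → b ≤ hi →
      |fSumThreshold arr a - target| ≤ |fSumThreshold arr b - target|) := by
  have hmem : hi ∈ arr := PySem.List.max?_mem hmax
  unfold findBestValue_alt
  rw [hmax]
  simp only [Option.getD_some, sumCapped_eq]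
  rw [if_neg (by omega : ¬ hi < 0)]
  by_cases h0 : target ≤ fSumThreshold arr 0
  · -- t = 0 : the sum already reaches target at threshold 0
    rw [if_pos h0]
    refine ⟨le_refl 0, hhi, ?_, ?_⟩
    · intro a b ha hab hb; omega
    · intro a b ha hab hb
      have h1 : fSumThreshold arr 0 ≤ fSumThreshold arr a := fSum_mono arr ha
      have h2 : fSumThreshold arr a ≤ fSumThreshold arr b := fSum_mono arr (le_of_lt hab)
      rw [abs_of_nonneg (by omega), abs_of_nonneg (by omega)]
      omega
  · rw [if_neg h0]
    by_cases hh : fSumThreshold arr hi < target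
    · -- t = hi : the sum never reaches target
      rw [if_pos hh]
      refine ⟨hhi, le_refl hi, ?_, ?_⟩
      · intro a b ha hab hb
        have h1 : fSumThreshold arr b ≤ fSumThreshold arr hi := fSum_mono arr hb
        have h2 : fSumThreshold arr a < fSumThreshold arr b := fSum_strict arr hmem hab (by omega)
        rw [abs_of_nonpos (by omega), abs_of_nonpos (by omega)]
        omega
      · intro a b ha hab hb; omega
    · -- t is one of the two neighbours around the crossing point
      rw [if_neg hh]
      have hpos : 0 < hi := by
        rcases lt_or_eq_of_le hhi with h | h
        · exact h
        · exfalso; rw [← h] at hh; omega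
      have hp := loopB_spec arr target hi.toNat 0 hi (by omega) hpos
        (by rw [sumCapped_eq]; omega) (by rw [sumCapped_eq]; omega)
      simp only [sumCapped_eq] at hp
      obtain ⟨hRL, hL0, hRhi, hSL, hSR⟩ := hp
      set L := (loopB arr target 0 hi).1 with hLdef
      set R := (loopB arr target 0 hi).2 with hRdef
      by_cases hcond : target - fSumThreshold arr L ≤ fSumThreshold arr R - target
      · -- t = L
        rw [if_pos hcond]
        refine ⟨hL0, by omega, ?_, ?_⟩
        · intro a b ha hab hb
          have h1 : fSumThreshold arr b ≤ fSumThreshold arr L := fSum_mono arr hb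
          have h2 : fSumThreshold arr a < fSumThreshold arr b := fSum_strict arr hmem hab (by omega)
          rw [abs_of_nonpos (by omega), abs_of_nonpos (by omega)]
          omega
        · intro a b ha hab hb
          by_cases haR : R ≤ a
          · have h1 : fSumThreshold arr R ≤ fSumThreshold arr a := fSum_mono arr haR
            have h2 : fSumThreshold arr a ≤ fSumThreshold arr b := fSum_mono arr (le_of_lt hab)
            rw [abs_of_nonneg (by omega), abs_of_nonneg (by omega)]
            omega
          · have haL : a = L := by omega
            have hbR : R ≤ b := by omega
            have h1 : fSumThreshold arr R ≤ fSumThreshold arr b := fSum_mono arr hbR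
            subst haL
            rw [abs_of_nonpos (by omega), abs_of_nonneg (by omega)]
            omega
      · -- t = R
        rw [if_neg hcond]
        refine ⟨by omega, hRhi, ?_, ?_⟩
        · intro a b ha hab hb
          by_cases hbL : b ≤ L
          · have h1 : fSumThreshold arr b ≤ fSumThreshold arr L := fSum_mono arr hbL
            have h2 : fSumThreshold arr a < fSumThreshold arr b := fSum_strict arr hmem hab (by omega)
            rw [abs_of_nonpos (by omega), abs_of_nonpos (by omega)]
            omega
          · have hbR : b = R := by omega
            have haL : a ≤ L := by omega
            have h1 : fSumThreshold arr a ≤ fSumThreshold arr L := fSum_mono arr haL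
            subst hbR
            rw [abs_of_nonneg (by omega), abs_of_nonpos (by omega)]
            omega
        · intro a b ha hab hb
          have h1 : fSumThreshold arr R ≤ fSumThreshold arr a := fSum_mono arr ha
          have h2 : fSumThreshold arr a ≤ fSumThreshold arr b := fSum_mono arr (le_of_lt hab)
          rw [abs_of_nonneg (by omega), abs_of_nonneg (by omega)]
          omega

-- updBest preserves validity of the tracked best
lemma updBest_valid (arr : List Int) (target hi m : Int) (bd : Option Int) (bv : Int)
    (hv : ∀ d, bd = some d → 0 ≤ bv ∧ bv ≤ hi ∧ |fSumThreshold arr bv - target| = d)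
    (hm0 : 0 ≤ m) (hm1 : m ≤ hi) :
    ∀ d, (updBest (|fSumThreshold arr m - target|) m bd bv).1 = some d →
      0 ≤ (updBest (|fSumThreshold arr m - target|) m bd bv).2 ∧
      (updBest (|fSumThreshold arr m - target|) m bd bv).2 ≤ hi ∧
      |fSumThreshold arr (updBest (|fSumThreshold arr m - target|) m bd bv).2 - target| = d := by
  unfold updBest
  split_ifs with h
  · intro d hd
    simp only at hd
    exact ⟨hm0, hm1, by rw [Option.some_inj] at hd; rw [hd]⟩
  · exact hv

-- once the best is the optimum t, updBest never changes it
lemma updBest_keep (arr : List Int) (target hi t m : Int)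
    (ht0 : 0 ≤ t) (ht1 : t ≤ hi)
    (Hdec : ∀ a b : Int, 0 ≤ a → a < b → b ≤ t →
      |fSumThreshold arr b - target| < |fSumThreshold arr a - target|)
    (Hmin : ∀ u : Int, 0 ≤ u → u ≤ hi →
      |fSumThreshold arr t - target| ≤ |fSumThreshold arr u - target|)
    (hm0 : 0 ≤ m) (hm1 : m ≤ hi) :
    updBest (|fSumThreshold arr m - target|) m (some (|fSumThreshold arr t - target|)) t =
      (some (|fSumThreshold arr t - target|), t) := by
  unfold updBest betterA
  have h1 : ¬ |fSumThreshold arr m - target| < |fSumThreshold arr t - target| :=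
    not_lt.mpr (Hmin m hm0 hm1)
  have h2 : ¬ (|fSumThreshold arr m - target| = |fSumThreshold arr t - target| ∧ m < t) := by
    rintro ⟨he, hlt⟩
    exact absurd he (ne_of_gt (Hdec m t hm0 hlt (le_refl t)))
  rw [if_neg]
  simp only [Bool.or_eq_true, Bool.and_eq_true, decide_eq_true_eq]
  tauto

-- when updBest sees the optimum t itself, the best becomes (exactly) t
lemma updBest_capture (arr : List Int) (target hi t : Int) (bd : Option Int) (bv : Int)
    (hv : ∀ d, bd = some d → 0 ≤ bv ∧ bv ≤ hi ∧ |fSumThreshold arr bv - target| = d)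
    (ht0 : 0 ≤ t) (ht1 : t ≤ hi)
    (Hdec : ∀ a b : Int, 0 ≤ a → a < b → b ≤ t →
      |fSumThreshold arr b - target| < |fSumThreshold arr a - target|)
    (Hmin : ∀ u : Int, 0 ≤ u → u ≤ hi →
      |fSumThreshold arr t - target| ≤ |fSumThreshold arr u - target|) :
    updBest (|fSumThreshold arr t - target|) t bd bv =
      (some (|fSumThreshold arr t - target|), t) := by
  unfold updBest betterA
  cases bd with
  | none => simp
  | some d =>
      obtain ⟨hbv0, hbv1, hbvd⟩ := hv d rfl
      split_ifs with h
      · rfl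
      · simp only [Bool.or_eq_true, Bool.and_eq_true, decide_eq_true_eq, not_or, not_and, not_lt] at h
        obtain ⟨hnl, hni⟩ := h
        have hge : |fSumThreshold arr t - target| ≤ d := by rw [← hbvd]; exact Hmin bv hbv0 hbv1
        have heq : |fSumThreshold arr t - target| = d := le_antisymm hge hnl
        have hbvt : bv = t := by
          rcases lt_trichotomy bv t with hc | hc | hc
          · exfalso
            have := Hdec bv t hbv0 hc (le_refl t)
            rw [hbvd, heq] at this
            exact lt_irrefl d this
          · exact hc
          · exact absurd hc (not_lt.mpr (hni heq))
        rw [heq, hbvt]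

-- loopA invariant: with the properties of t := findBestValue_alt, A's ternary loop returns t
lemma loopA_spec (arr : List Int) (target hi t : Int)
    (ht0 : 0 ≤ t) (ht1 : t ≤ hi)
    (Hdec : ∀ a b : Int, 0 ≤ a → a < b → b ≤ t →
      |fSumThreshold arr b - target| < |fSumThreshold arr a - target|)
    (Hinc : ∀ a b : Int, t ≤ a → a < b → b ≤ hi →
      |fSumThreshold arr a - target| ≤ |fSumThreshold arr b - target|) :
    ∀ n l r bd bv, (r - l + 1).toNat ≤ n → 0 ≤ l → r ≤ hi →
      (∀ d, bd = some d → 0 ≤ bv ∧ bv ≤ hi ∧ |fSumThreshold arr bv - target| = d) →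
      ((bd = some (|fSumThreshold arr t - target|) ∧ bv = t) ∨ (l ≤ t ∧ t ≤ r)) →
      loopA arr target l r bd bv = t := by
  have Hmin : ∀ u : Int, 0 ≤ u → u ≤ hi →
      |fSumThreshold arr t - target| ≤ |fSumThreshold arr u - target| := by
    intro u hu0 hu1
    rcases lt_trichotomy u t with h | h | h
    · exact le_of_lt (Hdec u t hu0 h (le_refl t))
    · rw [h]
    · exact Hinc t u (le_refl t) h hu1
  intro n
  induction n with
  | zero =>
      intro l r bd bv hn h0 hr hvalid hinv
      rw [loopA, dif_neg (by omega : ¬ l ≤ r)]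
      rcases hinv with ⟨_, hbv⟩ | ⟨h1, h2⟩
      · exact hbv
      · omega
  | succ n ih =>
      intro l r bd bv hn h0 hr hvalid hinv
      rw [loopA]
      by_cases hlr : l ≤ r
      · rw [dif_pos hlr]
        have h3 : PySem.Int.floordiv (r - l) 3 = (r - l) / 3 :=
          PySem.Int.floordiv_eq_ediv_of_pos (by omega)
        simp only [h3]
        set m1 := l + (r - l) / 3 with hm1
        set m2 := r - (r - l) / 3 with hm2
        have hb : l ≤ m1 ∧ m1 ≤ m2 ∧ m2 ≤ r := by rw [hm1, hm2]; omega
        have hm10 : 0 ≤ m1 := by omega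
        have hm1hi : m1 ≤ hi := by omega
        have hm20 : 0 ≤ m2 := by omega
        have hm2hi : m2 ≤ hi := by omega
        set p1 := updBest (|fSumThreshold arr m1 - target|) m1 bd bv with hp1
        set p2 := updBest (|fSumThreshold arr m2 - target|) m2 p1.1 p1.2 with hp2
        have hv1 := updBest_valid arr target hi m1 bd bv hvalid hm10 hm1hi
        have hv2 := updBest_valid arr target hi m2 p1.1 p1.2 hv1 hm20 hm2hi
        rcases hinv with ⟨hbd, hbv⟩ | ⟨hlt, htr⟩
        · -- the best is already t and stays t
          have hk1 : p1 = (some (|fSumThreshold arr t - target|), t) := by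
            rw [hp1, hbd, hbv]
            exact updBest_keep arr target hi t m1 ht0 ht1 Hdec Hmin hm10 hm1hi
          have hk2 : p2 = (some (|fSumThreshold arr t - target|), t) := by
            rw [hp2, hk1]
            exact updBest_keep arr target hi t m2 ht0 ht1 Hdec Hmin hm20 hm2hi
          split_ifs with hbr
          · exact ih (m1 + 1) r p2.1 p2.2 (by omega) (by omega) hr hv2
              (Or.inl ⟨by rw [hk2], by rw [hk2]⟩)
          · exact ih l (m2 - 1) p2.1 p2.2 (by omega) h0 (by omega) hv2
              (Or.inl ⟨by rw [hk2], by rw [hk2]⟩)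
        · -- t is still inside [l, r]
          split_ifs with hbr
          · -- diff1 > diff2 : t cannot be ≤ mid1
            have hmt : m1 + 1 ≤ t := by
              by_contra hc
              have htm1 : t ≤ m1 := by omega
              rcases eq_or_lt_of_le hb.2.1 with he | hlt12
              · rw [he] at hbr; exact lt_irrefl _ hbr
              · exact absurd hbr (not_lt.mpr (Hinc m1 m2 htm1 hlt12 hm2hi))
            exact ih (m1 + 1) r p2.1 p2.2 (by omega) (by omega) hr hv2 (Or.inr ⟨hmt, htr⟩)
          · by_cases htm : t ≤ m2 - 1
            · exact ih l (m2 - 1) p2.1 p2.2 (by omega) h0 (by omega) hv2 (Or.inr ⟨hlt, htm⟩)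
            · -- t = mid2 : the second update captures it
              have htm2 : t = m2 := by
                by_contra hc
                have hgt : m2 < t := by omega
                rcases eq_or_lt_of_le hb.2.1 with he | hlt12
                · have : r - l = 0 := by
                    rw [hm1, hm2] at he; omega
                  omega
                · exact absurd (Hdec m1 m2 hm10 hlt12 (by omega)) (not_lt.mpr (not_lt.mp hbr))
              have hk2 : p2 = (some (|fSumThreshold arr t - target|), t) := by
                rw [hp2, htm2]
                exact updBest_capture arr target hi m2 p1.1 p1.2 hv1 hm20 hm2hi
                  (by rw [← htm2]; exact Hdec) (by rw [← htm2]; exact Hmin)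
              exact ih l (m2 - 1) p2.1 p2.2 (by omega) h0 (by omega) hv2
                (Or.inl ⟨by rw [hk2], by rw [hk2]⟩)
      · rw [dif_neg hlr]
        rcases hinv with ⟨_, hbv⟩ | ⟨h1, h2⟩
        · exact hbv
        · omega

-- ===== VERDICT (by name: the statement is the Claim_ definition above) =====
theorem findBestValue_spec : Claim_equal_findBestValue := by
  unfold Claim_equal_findBestValue
  intro arr target hdom hpre
  unfold Spec_findBestValue
  obtain ⟨hi, hmax⟩ : ∃ hi, PySem.List.max? arr (fun y => y) = some hi := by
    cases h : PySem.List.max? arr (fun y => y) with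
    | none => exact absurd ((PySem.List.max?_eq_none_iff arr (fun y => y)).mp h) hpre
    | some m => exact ⟨m, rfl⟩
  by_cases hhi : hi < 0
  · -- max(arr) < 0 : A's loop never runs, B returns 0 directly
    unfold findBestValue findBestValue_alt
    simp only [hmax, Option.getD_some]
    rw [loopA, dif_neg (by omega : ¬ (0 : Int) ≤ hi), if_pos hhi]
  · rw [not_lt] at hhi
    obtain ⟨ht0, ht1, Hdec, Hinc⟩ := alt_props arr target hi hmax hhi
    unfold findBestValue
    simp only [hmax, Option.getD_some]
    exact loopA_spec arr target hi (findBestValue_alt arr target) ht0 ht1 Hdec Hinc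
      (hi + 1).toNat 0 hi none 0 (by omega) (le_refl 0) (le_refl hi)
      (by intro d hd; exact absurd hd (by simp)) (Or.inr ⟨ht0, ht1⟩)
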